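-- pv_equiv track=rewrite | github.com/a2006ly/sys-programming | cgt.py | calc7
-- ===== SOURCE A (Python) =====
-- i = 1
--
-- def calc7(numbers):
--     sum = 0
--     i = 0
--     double = False
--     n = len(numbers)
--     if n == 0: return -1
--     while i < n:
--         sum += numbers[i]
--         if double:
--             sum += numbers[i]
--             double = False
--         if numbers[i] == 7: double = True
--         i += 1
--     return sum
-- ===== SOURCE B (Python) =====
-- def calc7(numbers):
--     if not numbers:
--         return -1
--     total = sum(numbers)
--     for prev, cur in zip(numbers, numbers[1:]):
--         if prev == 7:
--             total += cur
--     return total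
-- ===== Notes on version B (the rewrite author's own statement) =====
-- stated objective: idiomatic
-- what changed: Replaces A's index-while loop with a carried 'double' boolean by a stateless base sum plus a zip-of-adjacent-pairs pass that adds each element whose predecessor is 7.
import Mathlib
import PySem

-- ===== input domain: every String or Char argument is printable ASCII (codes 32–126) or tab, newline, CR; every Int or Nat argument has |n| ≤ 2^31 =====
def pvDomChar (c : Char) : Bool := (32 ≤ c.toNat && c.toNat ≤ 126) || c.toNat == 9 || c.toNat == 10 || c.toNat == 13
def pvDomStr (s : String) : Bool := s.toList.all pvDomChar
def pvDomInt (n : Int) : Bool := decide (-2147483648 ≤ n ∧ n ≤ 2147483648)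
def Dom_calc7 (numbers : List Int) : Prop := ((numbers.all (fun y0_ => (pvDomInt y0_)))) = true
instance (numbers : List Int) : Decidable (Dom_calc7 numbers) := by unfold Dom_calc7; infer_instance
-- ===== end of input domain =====

-- B replaces A's while loop with a carried 'double' flag by a base sum plus a zip-of-adjacent-pairs pass (idiomatic).

-- ===== PORT A =====
-- while loop of A: state (sum, double), one step per element
def calc7Loop (xs : List Int) (s : Int) (double : Bool) : Int :=
  match xs with
  | [] => s
  | x :: rest =>
      let s := s + x
      let s := if double then s + x else s
      calc7Loop rest s (x == 7)

def calc7 (numbers : List Int) : Int :=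
  if numbers.length = 0 then -1
  else calc7Loop numbers 0 false

-- ===== PORT B =====
def calc7_alt (numbers : List Int) : Int :=
  if numbers = [] then -1
  else
    (numbers.zip numbers.tail).foldl
      (fun t pc => if pc.1 == 7 then t + pc.2 else t)
      (numbers.foldl (· + ·) 0)

-- ===== PRECONDITION & SPEC =====
def Spec_calc7 (numbers : List Int) (out : Int) : Prop := out = calc7_alt numbers
instance (numbers : List Int) (out : Int) : Decidable (Spec_calc7 numbers out) := by unfold Spec_calc7; infer_instance

-- ===== CLAIM (what is proved, stated in full; the proofs are below) =====
def Claim_equal_calc7 : Prop := ∀ (numbers : List Int), Dom_calc7 numbers → Spec_calc7 numbers (calc7 numbers)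

-- ===== LEMMAS AND PROOFS =====

theorem calc7Loop_shift (xs : List Int) (s : Int) (d : Bool) :
    calc7Loop xs s d = s + calc7Loop xs 0 d := by
  induction xs generalizing s d with
  | nil => simp [calc7Loop]
  | cons x rest ih =>
      simp only [calc7Loop]
      rw [ih, ih (if d then 0 + x + x else 0 + x)]
      split_ifs <;> ring_nf

def extraFold (zs : List (Int × Int)) (t : Int) : Int :=
  zs.foldl (fun t pc => if pc.1 == 7 then t + pc.2 else t) t

theorem extraFold_shift (zs : List (Int × Int)) (t : Int) :
    extraFold zs t = t + extraFold zs 0 := by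
  induction zs generalizing t with
  | nil => simp [extraFold]
  | cons z rest ih =>
      simp only [extraFold, List.foldl_cons] at *
      rw [ih, ih (if z.1 == 7 then 0 + z.2 else 0)]
      split_ifs <;> ring_nf

theorem sum_shift (xs : List Int) (t : Int) :
    xs.foldl (· + ·) t = t + xs.foldl (· + ·) 0 := by
  induction xs generalizing t with
  | nil => simp
  | cons x rest ih =>
      simp only [List.foldl_cons]
      rw [ih, ih (0 + x)]; ring_nf

theorem calc7Loop_char (xs : List Int) (d : Bool) :
    calc7Loop xs 0 d =
      xs.foldl (· + ·) 0 + extraFold (xs.zip xs.tail) 0 +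
        (if d then xs.headD 0 else 0) := by
  induction xs generalizing d with
  | nil => simp [calc7Loop, extraFold]
  | cons x rest ih =>
      simp only [calc7Loop]
      rw [calc7Loop_shift, ih]
      simp only [List.foldl_cons]
      rw [sum_shift rest (0 + x)]
      cases rest with
      | nil => simp [extraFold]; split_ifs <;> ring_nf
      | cons y ys =>
          have hz : ((x :: y :: ys).zip (x :: y :: ys).tail)
              = (x, y) :: ((y :: ys).zip (y :: ys).tail) := by
            simp [List.zip]
          rw [hz]
          simp only [extraFold, List.foldl_cons]
          rw [show List.foldl (fun t pc => if pc.1 == 7 then t + pc.2 else t)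
                (if x == 7 then 0 + y else 0) ((y :: ys).zip (y :: ys).tail)
              = extraFold ((y :: ys).zip (y :: ys).tail) (if x == 7 then 0 + y else 0) from rfl,
              extraFold_shift]
          simp only [extraFold, List.headD]
          split_ifs <;> ring_nf

-- ===== VERDICT (by name: the statement is the Claim_ definition above) =====
theorem calc7_spec : Claim_equal_calc7 := by
  intro numbers _
  unfold Spec_calc7 calc7 calc7_alt
  cases numbers with
  | nil => simp
  | cons x rest =>
      rw [if_neg (by simp), if_neg (by simp), calc7Loop_char,
          show List.foldl (fun t pc => if pc.1 == 7 then t + pc.2 else t)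
              ((x :: rest).foldl (· + ·) 0) ((x :: rest).zip (x :: rest).tail)
            = extraFold ((x :: rest).zip (x :: rest).tail) ((x :: rest).foldl (· + ·) 0) from rfl,
          extraFold_shift ((x :: rest).zip (x :: rest).tail) ((x :: rest).foldl (· + ·) 0)]
      simp
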